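-- pv_equiv track=rewrite | github.com/SashaNyhus/2023adventofcode | day03.py | look_for_adjacent_numbers
-- ===== SOURCE A (Python) =====
-- def find_numbers_in_row(row):
--     numbers_found = []
--     working_number = ""
--     working_index_start = None
--     for element_index in range(0, len(row)):
--         element = row[element_index]
--         if element.isnumeric():
--             working_number = working_number + element
--             if working_index_start is None:
--                 working_index_start = element_index
--         elif len(working_number) > 0:
--             numbers_found.append({
--                 'number_value': int(working_number),
--                 'index_start': working_index_start,
--                 'index_end': element_index - 1
--             })
--             working_number = ""
--             working_index_start = None
--     # the above code doesn't work for numbers at the end of the line, since it relies on finding a character that's not a number to recognize that a number has ended.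
--     # So before we move on, check to see if we still have working number data
--     if len(working_number) > 0:
--         numbers_found.append({
--             'number_value': int(working_number),
--             'index_start': working_index_start,
--             'index_end': len(row) - 1
--             })
--     return numbers_found
--
-- def look_for_adjacent_numbers(gear_index, row, row_above, row_below):
--     potential_numbers = []
--     numbers_above = find_numbers_in_row(row_above)
--     for number_listing in numbers_above:
--         if (gear_index >= (number_listing['index_start'] - 1)) and (gear_index <= number_listing['index_end'] + 1):
--             potential_numbers.append(number_listing['number_value'])
--     numbers_below = find_numbers_in_row(row_below)
--     for number_listing in numbers_below:
--         if (gear_index >= (number_listing['index_start'] - 1)) and (gear_index <= number_listing['index_end'] + 1):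
--             potential_numbers.append(number_listing['number_value'])
--     numbers_in_row = find_numbers_in_row(row)
--     for number_listing in numbers_in_row:
--         if (gear_index == number_listing['index_start'] - 1) or (gear_index == number_listing['index_end'] + 1):
--             potential_numbers.append(number_listing['number_value'])
--     return potential_numbers
-- ===== SOURCE B (Python) =====
-- def _num_at(chars, j):
--     # j is an in-range digit position; return (run start, full number value)
--     s = j
--     while s > 0 and chars[s - 1].isdigit():
--         s -= 1
--     e = j
--     while e + 1 < len(chars) and chars[e + 1].isdigit():
--         e += 1
--     return s, int(chars[s:e + 1])
--
-- def _window(chars, g):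
--     # numbers touching the 3-cell window around g, left to right, deduped by run start
--     vals = []
--     last_start = None
--     for j in (g - 1, g, g + 1):
--         if 0 <= j < len(chars) and chars[j].isdigit():
--             s, v = _num_at(chars, j)
--             if s != last_start:
--                 vals.append(v)
--                 last_start = s
--     return vals
--
-- def look_for_adjacent_numbers(gear_index, row, row_above, row_below):
--     vals = _window(row_above, gear_index) + _window(row_below, gear_index)
--
--     def digit(j):
--         return 0 <= j < len(row) and row[j].isdigit()
--
--     if digit(gear_index - 1) and not digit(gear_index):
--         vals.append(_num_at(row, gear_index - 1)[1])
--     if digit(gear_index + 1) and not digit(gear_index):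
--         vals.append(_num_at(row, gear_index + 1)[1])
--     return vals
-- ===== Notes on version B (the rewrite author's own statement) =====
-- stated objective: faster
-- what changed: Instead of scanning all three full rows to build every number record and then filtering by adjacency, B inspects only the 3-cell window around gear_index, expands each digit found there to its full number, and dedupes consecutive hits by run start.
import Mathlib
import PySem

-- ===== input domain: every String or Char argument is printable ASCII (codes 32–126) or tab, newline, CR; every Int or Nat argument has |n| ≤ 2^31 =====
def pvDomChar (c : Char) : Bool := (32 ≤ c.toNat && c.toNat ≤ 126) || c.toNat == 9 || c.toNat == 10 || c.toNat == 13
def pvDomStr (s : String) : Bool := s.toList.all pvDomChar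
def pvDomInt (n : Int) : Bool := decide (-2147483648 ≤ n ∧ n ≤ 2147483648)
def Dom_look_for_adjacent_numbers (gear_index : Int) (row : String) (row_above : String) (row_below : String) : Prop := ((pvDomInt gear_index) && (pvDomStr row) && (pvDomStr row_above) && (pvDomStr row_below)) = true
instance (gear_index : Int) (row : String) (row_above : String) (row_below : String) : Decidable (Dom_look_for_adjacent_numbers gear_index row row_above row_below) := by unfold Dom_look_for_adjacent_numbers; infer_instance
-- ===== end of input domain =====

-- B replaces A's full scan of all three rows by a direct inspection of the 3-cell window
-- around gear_index (expanding each digit found there to its full number); objective: faster.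

-- ===== PORT A =====
-- Python's `element.isnumeric()` / `.isdigit()` on a single printable-ASCII character is exactly '0'..'9'.
def pvIsNum (c : Char) : Bool := c.isDigit

-- the loop of find_numbers_in_row: index i, working_number wn, working_index_start ws, accumulator acc.
-- At the end of the string i = len(row), so the final flush's `len(row) - 1` is written `i - 1`.
-- `int(working_number)` is ported as `(PySem.Int.ofChars? wn).getD 0` and `ws` as `ws.getD 0`:
-- whenever a number is emitted wn is a nonempty digit string and ws is set, so the defaults are never used.
def pvFindAux : List Char → Int → List Char → Option Int → List (Int × Int × Int) → List (Int × Int × Int)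
  | [], i, wn, ws, acc =>
      if wn ≠ [] then acc ++ [((PySem.Int.ofChars? wn).getD 0, ws.getD 0, i - 1)] else acc
  | c :: rest, i, wn, ws, acc =>
      if pvIsNum c then
        pvFindAux rest (i + 1) (wn ++ [c]) (if ws = none then some i else ws) acc
      else if wn ≠ [] then
        pvFindAux rest (i + 1) [] none (acc ++ [((PySem.Int.ofChars? wn).getD 0, ws.getD 0, i - 1)])
      else
        pvFindAux rest (i + 1) wn ws acc

-- records {'number_value', 'index_start', 'index_end'} become triples in that order
def find_numbers_in_row (row : String) : List (Int × Int × Int) :=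
  pvFindAux row.toList 0 [] none []

def look_for_adjacent_numbers (gear_index : Int) (row : String) (row_above : String) (row_below : String) : List Int :=
  let p1 := (find_numbers_in_row row_above).foldl
    (fun acc t => if decide (gear_index ≥ t.2.1 - 1 ∧ gear_index ≤ t.2.2 + 1) then acc ++ [t.1] else acc) []
  let p2 := (find_numbers_in_row row_below).foldl
    (fun acc t => if decide (gear_index ≥ t.2.1 - 1 ∧ gear_index ≤ t.2.2 + 1) then acc ++ [t.1] else acc) p1
  (find_numbers_in_row row).foldl
    (fun acc t => if decide (gear_index = t.2.1 - 1 ∨ gear_index = t.2.2 + 1) then acc ++ [t.1] else acc) p2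

-- ===== PORT B =====
-- `while s > 0 and chars[s-1].isdigit(): s -= 1`  (s is only ever a valid index, so getD is exact)
def pvRunStart (chars : List Char) : Nat → Nat
  | 0 => 0
  | s + 1 => if pvIsNum (chars.getD s ' ') then pvRunStart chars s else s + 1

-- `while e + 1 < len(chars) and chars[e+1].isdigit(): e += 1`
def pvRunEnd (chars : List Char) (e : Nat) : Nat :=
  if h : e + 1 < chars.length ∧ pvIsNum (chars.getD (e + 1) ' ') then pvRunEnd chars (e + 1) else e
termination_by chars.length - e
decreasing_by omega

-- `chars[s:e+1]` for 0 ≤ s ≤ e+1 ≤ len(chars) is exactly (chars.drop s).take (e+1-s);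
-- `int(...)` of the digit slice as in port A
def pvNumAt (chars : List Char) (j : Nat) : Nat × Int :=
  let s := pvRunStart chars j
  let e := pvRunEnd chars j
  (s, (PySem.Int.ofChars? ((chars.drop s).take (e + 1 - s))).getD 0)

-- `0 <= j < len(chars) and chars[j].isdigit()`
def pvDigitAt (chars : List Char) (j : Int) : Bool :=
  decide (0 ≤ j ∧ j < chars.length) && pvIsNum (chars.getD j.toNat ' ')

-- loop body of _window: state (vals, last_start)
def pvWinStep (chars : List Char) (st : List Int × Option Nat) (j : Int) : List Int × Option Nat :=
  if pvDigitAt chars j then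
    let p := pvNumAt chars j.toNat
    if st.2 ≠ some p.1 then (st.1 ++ [p.2], some p.1) else st
  else st

def pvWindow (chars : List Char) (g : Int) : List Int :=
  (([g - 1, g, g + 1]).foldl (pvWinStep chars) ([], none)).1

def look_for_adjacent_numbers_alt (gear_index : Int) (row : String) (row_above : String) (row_below : String) : List Int :=
  let chars := row.toList
  let vals := pvWindow row_above.toList gear_index ++ pvWindow row_below.toList gear_index
  let vals := if pvDigitAt chars (gear_index - 1) && !pvDigitAt chars gear_index
              then vals ++ [(pvNumAt chars (gear_index - 1).toNat).2] else vals
  if pvDigitAt chars (gear_index + 1) && !pvDigitAt chars gear_index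
  then vals ++ [(pvNumAt chars (gear_index + 1).toNat).2] else vals

-- ===== PRECONDITION & SPEC =====
def Spec_look_for_adjacent_numbers (gear_index : Int) (row : String) (row_above : String) (row_below : String) (out : List Int) : Prop := out = look_for_adjacent_numbers_alt gear_index row row_above row_below
instance (gear_index : Int) (row : String) (row_above : String) (row_below : String) (out : List Int) : Decidable (Spec_look_for_adjacent_numbers gear_index row row_above row_below out) := by unfold Spec_look_for_adjacent_numbers; infer_instance

-- ===== CLAIM (what is proved, stated in full; the proofs are below) =====
def Claim_equal_look_for_adjacent_numbers : Prop := ∀ (gear_index : Int) (row : String) (row_above : String) (row_below : String), Dom_look_for_adjacent_numbers gear_index row row_above row_below → Spec_look_for_adjacent_numbers gear_index row row_above row_below (look_for_adjacent_numbers gear_index row row_above row_below)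

-- ===== LEMMAS AND PROOFS =====

/- digit test at an arbitrary Nat position (false out of range) -/
def pvDig (cs : List Char) (k : Nat) : Bool := (cs[k]?.map pvIsNum).getD false

/- k is the leftmost position of a maximal digit run -/
def pvStart (cs : List Char) (r : Nat) : Bool := pvDig cs r && (decide (r = 0) || !pvDig cs (r - 1))

/- the maximal digit runs of cs, as (absolute start, digit chars), left to right; i = offset of cs -/
def pvRuns : List Char → Nat → List (Nat × List Char)
  | [], _ => []
  | c :: rest, i =>
      if h : pvIsNum c then
        (i, (c :: rest).takeWhile pvIsNum)
          :: pvRuns ((c :: rest).dropWhile pvIsNum) (i + ((c :: rest).takeWhile pvIsNum).length)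
      else pvRuns rest (i + 1)
termination_by cs _ => cs.length
decreasing_by
  · simp [h]
    exact List.length_dropWhile_le _ _
  · simp

def pvVal (p : Nat × List Char) : Int := (PySem.Int.ofChars? p.2).getD 0

def pvMkT (p : Nat × List Char) : Int × Int × Int :=
  (pvVal p, (p.1 : Int), (p.1 : Int) + p.2.length - 1)

theorem pvDig_lt {cs : List Char} {k : Nat} (h : pvDig cs k = true) : k < cs.length := by
  by_contra hk
  simp [pvDig, List.getElem?_eq_none (by omega : cs.length ≤ k)] at h

theorem pvDig_getD {cs : List Char} {k : Nat} (h : k < cs.length) :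
    pvDig cs k = pvIsNum (cs.getD k ' ') := by
  simp [pvDig, List.getD_eq_getElem?_getD, List.getElem?_eq_getElem h]

theorem pvDig_getD' (cs : List Char) (k : Nat) :
    pvDig cs k = (decide (k < cs.length) && pvIsNum (cs.getD k ' ')) := by
  by_cases h : k < cs.length
  · simp [pvDig_getD h, h]
  · simp [h, pvDig, List.getElem?_eq_none (by omega : cs.length ≤ k)]

theorem pvDig_drop (cs : List Char) (m k : Nat) : pvDig (cs.drop m) k = pvDig cs (m + k) := by
  simp [pvDig, List.getElem?_drop]

theorem pvDigitAt_iff {cs : List Char} {j : Int} :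
    pvDigitAt cs j = true ↔ 0 ≤ j ∧ (j.toNat : Int) = j ∧ pvDig cs j.toNat = true := by
  constructor
  · intro h
    simp [pvDigitAt] at h
    refine ⟨h.1.1, by omega, ?_⟩
    rw [pvDig_getD (by omega)]
    exact h.2
  · rintro ⟨h0, hj, hd⟩
    have hlt := pvDig_lt hd
    rw [pvDig_getD hlt] at hd
    have hjl : j < (cs.length : Int) := by omega
    rw [List.getD_eq_getElem?_getD, List.getElem?_eq_getElem hlt] at hd
    simp only [Option.getD_some] at hd
    simp [pvDigitAt, h0, hjl, hd]

/- takeWhile: every position below its length satisfies p -/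
theorem takeWhile_dig_all {l : List Char} {p : Char → Bool} {k : Nat}
    (h : k < (l.takeWhile p).length) : (l[k]?.map p).getD false = true := by
  induction l generalizing k with
  | nil => simp at h
  | cons c rest ih =>
    by_cases hc : p c
    · simp [List.takeWhile_cons, hc] at h
      cases k with
      | zero => simp [hc]
      | succ k' => simpa using ih (by omega)
    · simp [List.takeWhile_cons, hc] at h

/- takeWhile: the position right after it fails p (or is out of range) -/
theorem takeWhile_dig_end (l : List Char) (p : Char → Bool) :
    (l[(l.takeWhile p).length]?.map p).getD false = false := by
  induction l with
  | nil => simp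
  | cons c rest ih =>
    by_cases hc : p c
    · simpa [List.takeWhile_cons, hc] using ih
    · simp [List.takeWhile_cons, hc]

theorem run_dig_all {cs : List Char} {r k : Nat}
    (h : k < ((cs.drop r).takeWhile pvIsNum).length) : pvDig cs (r + k) = true := by
  have := takeWhile_dig_all (l := cs.drop r) (p := pvIsNum) h
  rwa [show ((cs.drop r)[k]?.map pvIsNum).getD false = pvDig (cs.drop r) k from rfl,
    pvDig_drop] at this

theorem run_dig_end (cs : List Char) (r : Nat) :
    pvDig cs (r + ((cs.drop r).takeWhile pvIsNum).length) = false := by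
  have := takeWhile_dig_end (cs.drop r) pvIsNum
  rwa [show (((cs.drop r))[((cs.drop r).takeWhile pvIsNum).length]?.map pvIsNum).getD false
      = pvDig (cs.drop r) ((cs.drop r).takeWhile pvIsNum).length from rfl, pvDig_drop] at this

theorem run_len_pos {cs : List Char} {r : Nat} (h : pvDig cs r = true) :
    0 < ((cs.drop r).takeWhile pvIsNum).length := by
  have h0 : pvDig (cs.drop r) 0 = true := by rw [pvDig_drop]; simpa using h
  cases hcs : cs.drop r with
  | nil => rw [hcs] at h0; simp [pvDig] at h0
  | cons c rest =>
    rw [hcs] at h0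
    simp [pvDig] at h0
    simp [List.takeWhile_cons, h0]

theorem run_take_eq (cs : List Char) (r : Nat) :
    (cs.drop r).take ((cs.drop r).takeWhile pvIsNum).length = (cs.drop r).takeWhile pvIsNum := by
  exact ((List.prefix_iff_eq_take).1 (List.takeWhile_prefix pvIsNum)).symm

/- pvRunStart walks left over digits: characterisation -/
theorem runStart_le (cs : List Char) (j : Nat) : pvRunStart cs j ≤ j := by
  induction j with
  | zero => simp [pvRunStart]
  | succ s ih =>
    rw [pvRunStart]
    by_cases h : pvIsNum (cs.getD s ' ')
    · simp only [h, if_true]; omega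
    · rw [List.getD_eq_getElem?_getD] at h
      simp [h]

theorem runStart_char (cs : List Char) (j : Nat) :
    (∀ k, pvRunStart cs j ≤ k → k < j → pvDig cs k = true) ∧
    (pvRunStart cs j = 0 ∨ pvDig cs (pvRunStart cs j - 1) = false) := by
  induction j with
  | zero => exact ⟨by omega, Or.inl rfl⟩
  | succ s ih =>
    rw [pvRunStart]
    by_cases h : pvIsNum (cs.getD s ' ')
    · have hs : s < cs.length := by
        by_contra hs
        rw [List.getD_eq_getElem?_getD, List.getElem?_eq_none (by omega)] at h
        simp [pvIsNum] at h
      have hds : pvDig cs s = true := by rw [pvDig_getD hs]; exact h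
      simp only [h, if_true]
      refine ⟨?_, ih.2⟩
      intro k hk1 hk2
      rcases Nat.lt_or_ge k s with hk | hk
      · exact ih.1 k hk1 hk
      · have hks : k = s := by omega
        subst hks; exact hds
    · have hds : pvDig cs s = false := by
        rw [pvDig_getD']
        by_cases hsl : s < cs.length
        · simp only [hsl, decide_true, Bool.true_and]
          exact Bool.eq_false_iff.mpr h
        · simp [hsl]
      rw [if_neg h]
      exact ⟨by intro k h1 h2; omega, Or.inr (by simpa using hds)⟩

theorem runStart_eq {cs : List Char} {r j : Nat}
    (hall : ∀ k, r ≤ k → k ≤ j → pvDig cs k = true)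
    (hb : r = 0 ∨ pvDig cs (r - 1) = false) (hrj : r ≤ j) : pvRunStart cs j = r := by
  induction j with
  | zero => have : r = 0 := by omega
            subst this; rfl
  | succ s ih =>
    rw [pvRunStart]
    by_cases hrs : r ≤ s
    · have hdig : pvDig cs s = true := hall s hrs (by omega)
      have hlen := pvDig_lt hdig
      have h : pvIsNum (cs.getD s ' ') = true := by rw [← pvDig_getD hlen]; exact hdig
      simp only [h, if_true]
      exact ih (fun k a b => hall k a (by omega)) hrs
    · have hr : r = s + 1 := by omega
      subst hr
      have hdig : pvDig cs s = false := by
        rcases hb with h0 | h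
        · omega
        · simpa using h
      have h : pvIsNum (cs.getD s ' ') = false := by
        by_cases hsl : s < cs.length
        · rw [← pvDig_getD hsl]; exact hdig
        · simp only [List.getD_eq_getElem?_getD, List.getElem?_eq_none (show cs.length ≤ s by omega), Option.getD_none]
          decide
      rw [if_neg (by simp only [h]; simp)]

theorem runStart_start {cs : List Char} {j : Nat} (h : pvDig cs j = true) :
    pvStart cs (pvRunStart cs j) = true := by
  have hdig : pvDig cs (pvRunStart cs j) = true := by
    rcases Nat.eq_or_lt_of_le (runStart_le cs j) with he | hlt
    · rwa [he]
    · exact (runStart_char cs j).1 _ le_rfl hlt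
  unfold pvStart
  rcases (runStart_char cs j).2 with h0 | hb
  · rw [h0] at hdig ⊢; simp [hdig]
  · simp [hdig, hb]

/- pvRunEnd walks right over digits: characterisation -/
theorem runEnd_char (cs : List Char) (j : Nat) :
    j ≤ pvRunEnd cs j ∧ (∀ k, j < k → k ≤ pvRunEnd cs j → pvDig cs k = true) ∧
    pvDig cs (pvRunEnd cs j + 1) = false := by
  have H : ∀ n j, cs.length - j ≤ n →
      j ≤ pvRunEnd cs j ∧ (∀ k, j < k → k ≤ pvRunEnd cs j → pvDig cs k = true) ∧
      pvDig cs (pvRunEnd cs j + 1) = false := by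
    intro n
    induction n with
    | zero =>
      intro e he
      rw [pvRunEnd, dif_neg (by omega)]
      refine ⟨le_rfl, by intro k h1 h2; omega, ?_⟩
      rw [pvDig_getD']
      simp [show ¬ (e + 1 < cs.length) by omega]
    | succ n ih =>
      intro e he
      rw [pvRunEnd]
      by_cases h : e + 1 < cs.length ∧ pvIsNum (cs.getD (e + 1) ' ') = true
      · rw [dif_pos h]
        obtain ⟨ih1, ih2, ih3⟩ := ih (e + 1) (by omega)
        refine ⟨by omega, ?_, ih3⟩
        intro k hk1 hk2
        rcases Nat.lt_or_ge (e + 1) k with hk | hk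
        · exact ih2 k (by omega) hk2
        · have hke : k = e + 1 := by omega
          subst hke
          rw [pvDig_getD h.1]; exact h.2
      · rw [dif_neg h]
        refine ⟨le_rfl, by intro k h1 h2; omega, ?_⟩
        rw [pvDig_getD']
        by_cases hl : e + 1 < cs.length
        · have hn := not_and.mp h hl
          simp only [hl, decide_true, Bool.true_and]
          exact Bool.eq_false_iff.mpr hn
        · simp [hl]
  exact H (cs.length - j) j le_rfl

theorem runEnd_eq {cs : List Char} {j e : Nat}
    (hall : ∀ k, j < k → k ≤ e → pvDig cs k = true)
    (hend : pvDig cs (e + 1) = false) (hje : j ≤ e) : pvRunEnd cs j = e := by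
  obtain ⟨h1, h2, h3⟩ := runEnd_char cs j
  rcases Nat.lt_trichotomy (pvRunEnd cs j) e with h | h | h
  · have hc := hall (pvRunEnd cs j + 1) (by omega) (by omega)
    rw [h3] at hc; exact absurd hc (by simp)
  · exact h
  · have hc := h2 (e + 1) (by omega) (by omega)
    rw [hend] at hc; exact absurd hc (by simp)

/- shifting pvStart across a dropped prefix: exact when the cut is at a run boundary -/
theorem pvStart_drop {cs : List Char} {m : Nat}
    (hm : pvDig cs m = false ∨ (0 < m ∧ pvDig cs (m - 1) = false)) (k : Nat) :
    pvStart (cs.drop m) k = pvStart cs (m + k) := by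
  cases k with
  | zero =>
    unfold pvStart
    rw [pvDig_drop]
    simp only [Nat.add_zero, decide_eq_true_eq]
    rcases hm with hm | ⟨hm0, hm1⟩
    · rw [hm]; simp
    · rw [hm1]
      simp only [Bool.not_false, Bool.or_true, Bool.and_true]
      by_cases h0 : m = 0
      · omega
      · simp [h0]
  | succ k' =>
    unfold pvStart
    rw [pvDig_drop, pvDig_drop]
    have h1 : m + (k' + 1) - 1 = m + k' := by omega
    have h2 : k' + 1 - 1 = k' := by omega
    rw [h1, h2]
    simp [Nat.add_eq_zero]

theorem dropWhile_eq_drop_len (l : List Char) (p : Char → Bool) :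
    l.dropWhile p = l.drop (l.takeWhile p).length := by
  conv_lhs => rw [← List.drop_left (l₁ := l.takeWhile p) (l₂ := l.dropWhile p)]
  rw [List.takeWhile_append_dropWhile]

/- membership in pvRuns: exactly the maximal runs, shifted by the offset -/
theorem mem_pvRuns {cs : List Char} {i : Nat} {p : Nat × List Char} :
    p ∈ pvRuns cs i ↔
      ∃ r, p.1 = i + r ∧ pvStart cs r = true ∧ p.2 = (cs.drop r).takeWhile pvIsNum := by
  have H : ∀ n (cs : List Char) (i : Nat) (p : Nat × List Char), cs.length ≤ n →
      (p ∈ pvRuns cs i ↔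
        ∃ r, p.1 = i + r ∧ pvStart cs r = true ∧ p.2 = (cs.drop r).takeWhile pvIsNum) := by
    intro n
    induction n with
    | zero =>
      intro cs i p hlen
      have : cs = [] := by cases cs <;> simp_all
      subst this
      simp [pvRuns, pvStart, pvDig]
    | succ n ih =>
      intro cs i p hlen
      cases cs with
      | nil => simp [pvRuns, pvStart, pvDig]
      | cons c rest =>
        rw [pvRuns]
        by_cases h : pvIsNum c
        · rw [dif_pos h]
          have hdig0 : pvDig (c :: rest) 0 = true := by simp [pvDig, h]
          have hLpos : 0 < ((c :: rest).takeWhile pvIsNum).length := by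
            simp [List.takeWhile_cons, h]
          have hdw := dropWhile_eq_drop_len (c :: rest) pvIsNum
          have hend : pvDig (c :: rest) ((c :: rest).takeWhile pvIsNum).length = false := by
            simpa using run_dig_end (c :: rest) 0
          have hIH := ih ((c :: rest).dropWhile pvIsNum)
            (i + ((c :: rest).takeWhile pvIsNum).length) p
            (by rw [hdw, List.length_drop]; simp at hlen ⊢; omega)
          constructor
          · intro hmem
            rcases List.mem_cons.mp hmem with rfl | htail
            · exact ⟨0, by simp, by unfold pvStart; simp [hdig0], by simp⟩
            · obtain ⟨r', hr1, hr2, hr3⟩ := hIH.mp htail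
              refine ⟨((c :: rest).takeWhile pvIsNum).length + r', by omega, ?_, ?_⟩
              · rw [← pvStart_drop (Or.inl hend) r']
                rw [hdw] at hr2
                exact hr2
              · rw [hdw, List.drop_drop] at hr3
                exact hr3
          · rintro ⟨r, hr1, hr2, hr3⟩
            have hr2' : pvDig (c :: rest) r = true ∧
                (r = 0 ∨ pvDig (c :: rest) (r - 1) = false) := by
              rw [pvStart] at hr2
              simp only [Bool.and_eq_true, Bool.or_eq_true, decide_eq_true_eq,
                Bool.not_eq_true'] at hr2
              exact hr2
            rcases Nat.eq_zero_or_pos r with rfl | hrpos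
            · have hp : p = (i, (c :: rest).takeWhile pvIsNum) := by
                rcases p with ⟨p1, p2⟩
                simp at hr1 hr3 ⊢
                exact ⟨hr1, by simpa using hr3⟩
              rw [hp]
              exact List.mem_cons_self ..
            · have hrL : ((c :: rest).takeWhile pvIsNum).length < r := by
                rcases Nat.lt_trichotomy r ((c :: rest).takeWhile pvIsNum).length with hx | hx | hx
                · exfalso
                  rcases hr2'.2 with h0 | hbd
                  · omega
                  · have := run_dig_all (cs := c :: rest) (r := 0) (k := r - 1)
                      (by simpa using (by omega : r - 1 < ((c :: rest).takeWhile pvIsNum).length))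
                    simp at this
                    rw [hbd] at this; exact absurd this (by simp)
                · exfalso; rw [hx] at hr2'; rw [hend] at hr2'
                  exact absurd hr2'.1 (by simp)
                · exact hx
              apply List.mem_cons_of_mem
              apply hIH.mpr
              refine ⟨r - ((c :: rest).takeWhile pvIsNum).length, by omega, ?_, ?_⟩
              · rw [hdw, pvStart_drop (Or.inl hend)]
                rw [show ((c :: rest).takeWhile pvIsNum).length
                    + (r - ((c :: rest).takeWhile pvIsNum).length) = r by omega]
                exact hr2
              · rw [hdw, List.drop_drop]
                rw [show ((c :: rest).takeWhile pvIsNum).length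
                    + (r - ((c :: rest).takeWhile pvIsNum).length) = r by omega]
                exact hr3
        · rw [dif_neg h]
          have hdig0 : pvDig (c :: rest) 0 = false := by simp [pvDig, h]
          have hIH := ih rest (i + 1) p (by simp at hlen; omega)
          have hshift : ∀ k, pvStart rest k = pvStart (c :: rest) (1 + k) := by
            intro k
            have := pvStart_drop (cs := c :: rest) (m := 1)
              (Or.inr ⟨by omega, by simpa using hdig0⟩) k
            simpa using this
          constructor
          · intro hmem
            obtain ⟨r', hr1, hr2, hr3⟩ := hIH.mp hmem
            refine ⟨1 + r', by omega, ?_, ?_⟩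
            · rw [← hshift]; exact hr2
            · rw [show (1 + r') = r' + 1 by omega, List.drop_succ_cons]
              exact hr3
          · rintro ⟨r, hr1, hr2, hr3⟩
            have hrpos : 0 < r := by
              rcases Nat.eq_zero_or_pos r with rfl | h' 
              · rw [pvStart] at hr2; rw [hdig0] at hr2; simp at hr2
              · exact h'
            apply hIH.mpr
            refine ⟨r - 1, by omega, ?_, ?_⟩
            · rw [hshift, show 1 + (r - 1) = r by omega]; exact hr2
            · rw [show r = (r - 1) + 1 by omega, List.drop_succ_cons] at hr3
              exact hr3
  exact H cs.length cs i p le_rfl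

theorem pvRuns_pairwise (cs : List Char) (i : Nat) :
    (pvRuns cs i).Pairwise (fun a b => a.1 < b.1) := by
  have H : ∀ n (cs : List Char) (i : Nat), cs.length ≤ n →
      (pvRuns cs i).Pairwise (fun a b => a.1 < b.1) := by
    intro n
    induction n with
    | zero =>
      intro cs i hlen
      have : cs = [] := by cases cs <;> simp_all
      subst this; simp [pvRuns]
    | succ n ih =>
      intro cs i hlen
      cases cs with
      | nil => simp [pvRuns]
      | cons c rest =>
        rw [pvRuns]
        by_cases h : pvIsNum c
        · rw [dif_pos h]
          have hLpos : 0 < ((c :: rest).takeWhile pvIsNum).length := by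
            simp [List.takeWhile_cons, h]
          have hdw := dropWhile_eq_drop_len (c :: rest) pvIsNum
          apply List.pairwise_cons.mpr
          refine ⟨?_, ih _ _ (by rw [hdw, List.length_drop]; simp at hlen ⊢; omega)⟩
          intro b hb
          obtain ⟨r, hr1, -, -⟩ := mem_pvRuns.mp hb
          simp only []
          omega
        · rw [dif_neg h]
          exact ih rest (i + 1) (by simp at hlen; omega)
  exact H cs.length cs i le_rfl

theorem pvRuns_nodup (cs : List Char) (i : Nat) : (pvRuns cs i).Nodup := by
  exact (pvRuns_pairwise cs i).imp (by intro a b h; intro he; subst he; omega)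

/- facts about a run at offset 0 -/
theorem run_facts {cs : List Char} {p : Nat × List Char} (h : p ∈ pvRuns cs 0) :
    0 < p.2.length ∧ (∀ k, k < p.2.length → pvDig cs (p.1 + k) = true) ∧
    pvDig cs (p.1 + p.2.length) = false ∧ (p.1 = 0 ∨ pvDig cs (p.1 - 1) = false) ∧
    p.2 = (cs.drop p.1).takeWhile pvIsNum := by
  obtain ⟨r, hr1, hr2, hr3⟩ := mem_pvRuns.mp h
  have hr : p.1 = r := by omega
  have hr2' : pvDig cs r = true ∧ (r = 0 ∨ pvDig cs (r - 1) = false) := by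
    rw [pvStart] at hr2
    simp only [Bool.and_eq_true, Bool.or_eq_true, decide_eq_true_eq, Bool.not_eq_true'] at hr2
    exact hr2
  refine ⟨?_, ?_, ?_, ?_, ?_⟩
  · rw [hr3]; exact run_len_pos hr2'.1
  · intro k hk
    rw [hr3] at hk
    rw [hr]
    exact run_dig_all hk
  · rw [hr, hr3]
    exact run_dig_end cs r
  · rw [hr]; exact hr2'.2
  · rw [hr]; exact hr3

theorem run_of_dig {cs : List Char} {j : Nat} (h : pvDig cs j = true) :
    (pvRunStart cs j, (cs.drop (pvRunStart cs j)).takeWhile pvIsNum) ∈ pvRuns cs 0 := by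
  exact mem_pvRuns.mpr ⟨pvRunStart cs j, by simp, runStart_start h, rfl⟩

theorem run_unique {cs : List Char} {p : Nat × List Char} {j : Nat} (hp : p ∈ pvRuns cs 0)
    (h1 : p.1 ≤ j) (h2 : j < p.1 + p.2.length) : pvRunStart cs j = p.1 := by
  obtain ⟨hL, hall, hend, hb, hds⟩ := run_facts hp
  apply runStart_eq ?_ hb h1
  intro k hk1 hk2
  have hlt : k - p.1 < p.2.length := by omega
  have hd := hall _ hlt
  rwa [Nat.add_sub_cancel' hk1] at hd

theorem numAt_eq {cs : List Char} {p : Nat × List Char} {j : Nat} (hp : p ∈ pvRuns cs 0)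
    (h1 : p.1 ≤ j) (h2 : j < p.1 + p.2.length) : pvNumAt cs j = (p.1, pvVal p) := by
  obtain ⟨hL, hall, hend, hb, hds⟩ := run_facts hp
  have hs : pvRunStart cs j = p.1 := run_unique hp h1 h2
  have he : pvRunEnd cs j = p.1 + p.2.length - 1 := by
    apply runEnd_eq
    · intro k hk1 hk2
      have hlt : k - p.1 < p.2.length := by omega
      have hd := hall _ hlt
      rwa [Nat.add_sub_cancel' (by omega)] at hd
    · rw [show p.1 + p.2.length - 1 + 1 = p.1 + p.2.length by omega]
      exact hend
    · omega
  show (pvRunStart cs j,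
      (PySem.Int.ofChars? ((cs.drop (pvRunStart cs j)).take
        (pvRunEnd cs j + 1 - pvRunStart cs j))).getD 0) = (p.1, pvVal p)
  rw [hs, he, show p.1 + p.2.length - 1 + 1 - p.1 = p.2.length by omega]
  rw [show p.2.length = ((cs.drop p.1).takeWhile pvIsNum).length by rw [hds], run_take_eq,
    ← hds]
  rfl

/- filter of a Nodup list equals a sublist when the predicate is membership in it -/
theorem filter_eq_of_sublist {α : Type} [DecidableEq α] {L runs : List α} {p : α → Bool}
    (hs : List.Sublist L runs) (hn : runs.Nodup) (hiff : ∀ x ∈ runs, (p x = true ↔ x ∈ L)) :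
    runs.filter p = L := by
  induction runs generalizing L with
  | nil =>
    rw [List.sublist_nil.mp hs]; rfl
  | cons h t ih =>
    by_cases hmem : h ∈ L
    · cases hs with
      | cons _ hs' =>
        exact absurd (hs'.subset hmem) (List.nodup_cons.mp hn).1
      | cons₂ _ hs' =>
        rename_i L'
        have hph : p h = true := (hiff h (by simp)).mpr hmem
        rw [List.filter_cons, if_pos hph]
        congr 1
        apply ih hs' hn.of_cons
        intro x hx
        rw [hiff x (by simp [hx])]
        constructor
        · intro hxl
          rcases List.mem_cons.mp hxl with rfl | h2
          · exact absurd hx (List.nodup_cons.mp hn).1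
          · exact h2
        · intro hx'; exact List.mem_cons_of_mem _ hx'
    · have hph : p h = false := by
        rw [Bool.eq_false_iff]
        intro hc
        exact hmem ((hiff h (by simp)).mp hc)
      rw [List.filter_cons, if_neg (by simp [hph])]
      have hs' : List.Sublist L t := by
        cases hs with
        | cons _ hs' => exact hs'
        | cons₂ _ _ => exact absurd (by simp) hmem
      apply ih hs' hn.of_cons
      intro x hx
      exact hiff x (by simp [hx])

theorem pair_sublist {α : Type} {runs : List α} {f : α → Nat}
    (hp : runs.Pairwise (fun a b => f a < f b)) {a b : α}
    (ha : a ∈ runs) (hb : b ∈ runs) (hab : f a < f b) : List.Sublist [a, b] runs := by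
  induction runs with
  | nil => simp at ha
  | cons h t ih =>
    rcases List.mem_cons.mp ha with rfl | hat
    · have hbt : b ∈ t := by
        rcases List.mem_cons.mp hb with rfl | h'
        · omega
        · exact h'
      exact List.Sublist.cons₂ _ (List.singleton_sublist.mpr hbt)
    · have hbt : b ∈ t := by
        rcases List.mem_cons.mp hb with rfl | h'
        · have := (List.pairwise_cons.mp hp).1 a hat; omega
        · exact h'
      exact List.Sublist.cons _ (ih (List.pairwise_cons.mp hp).2 hat hbt)

/- the run containing digit position j, in canonical form -/
def pvRunOf (cs : List Char) (j : Nat) : Nat × List Char :=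
  (pvRunStart cs j, (cs.drop (pvRunStart cs j)).takeWhile pvIsNum)

theorem runOf_spec {cs : List Char} {j : Nat} (h : pvDig cs j = true) :
    pvRunOf cs j ∈ pvRuns cs 0 ∧ (pvRunOf cs j).1 ≤ j ∧
    j < (pvRunOf cs j).1 + (pvRunOf cs j).2.length ∧
    pvNumAt cs j = ((pvRunOf cs j).1, pvVal (pvRunOf cs j)) := by
  have hmem : pvRunOf cs j ∈ pvRuns cs 0 := run_of_dig h
  obtain ⟨hL, hall, hend, hb, hds⟩ := run_facts hmem
  have h1 : (pvRunOf cs j).1 ≤ j := runStart_le cs j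
  have hcont : ∀ k, (pvRunOf cs j).1 ≤ k → k ≤ j → pvDig cs k = true := by
    intro k hk1 hk2
    rcases Nat.lt_or_ge k j with hk | hk
    · exact (runStart_char cs j).1 k hk1 hk
    · have : k = j := by omega
      subst this; exact h
  have h2 : j < (pvRunOf cs j).1 + (pvRunOf cs j).2.length := by
    by_contra hc
    have := hcont ((pvRunOf cs j).1 + (pvRunOf cs j).2.length) (by omega) (by omega)
    rw [hend] at this
    exact absurd this (by simp)
  exact ⟨hmem, h1, h2, numAt_eq hmem h1 h2⟩

theorem run_eq_runOf {cs : List Char} {x : Nat × List Char} {j : Nat} (hx : x ∈ pvRuns cs 0)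
    (h1 : x.1 ≤ j) (h2 : j < x.1 + x.2.length) : x = pvRunOf cs j := by
  obtain ⟨-, -, -, -, hds⟩ := run_facts hx
  have hs := run_unique hx h1 h2
  rcases x with ⟨x1, x2⟩
  simp only at hs hds
  rw [pvRunOf, hs, ← hds]

theorem run_dig_mem {cs : List Char} {x : Nat × List Char} {j : Nat} (hx : x ∈ pvRuns cs 0)
    (h1 : x.1 ≤ j) (h2 : j < x.1 + x.2.length) : pvDig cs j = true := by
  obtain ⟨-, hall, -, -, -⟩ := run_facts hx
  have := hall (j - x.1) (by omega)
  rwa [Nat.add_sub_cancel' h1] at this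

theorem pvDigitAt_false {cs : List Char} {w : Int} (h : pvDigitAt cs w = false)
    {jn : Nat} (hj : (jn : Int) = w) : pvDig cs jn = false := by
  by_contra hc
  rw [Bool.not_eq_false] at hc
  have : pvDigitAt cs w = true := pvDigitAt_iff.mpr ⟨by omega, by omega, by
    rw [show w.toNat = jn by omega]; exact hc⟩
  rw [h] at this; exact absurd this (by simp)

/- every run passing A's adjacency test contains one of the three window cells -/
theorem Q_run {cs : List Char} {g : Int} {x : Nat × List Char} (hx : x ∈ pvRuns cs 0)
    (hq : g ≥ (x.1 : Int) - 1 ∧ g ≤ ((x.1 : Int) + x.2.length - 1) + 1) :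
    ∃ j : Nat, ((j : Int) = g - 1 ∨ (j : Int) = g ∨ (j : Int) = g + 1) ∧
      pvDig cs j = true ∧ x = pvRunOf cs j := by
  obtain ⟨hL, -, -, -, -⟩ := run_facts hx
  by_cases h1 : g < (x.1 : Int)
  · refine ⟨x.1, by omega, ?_, ?_⟩
    · exact run_dig_mem hx le_rfl (by omega)
    · exact run_eq_runOf hx le_rfl (by omega)
  · by_cases h2 : ((x.1 : Int) + x.2.length - 1) < g
    · refine ⟨x.1 + x.2.length - 1, by omega, ?_, ?_⟩
      · exact run_dig_mem hx (by omega) (by omega)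
      · exact run_eq_runOf hx (by omega) (by omega)
    · refine ⟨g.toNat, by omega, ?_, ?_⟩
      · exact run_dig_mem hx (by omega) (by omega)
      · exact run_eq_runOf hx (by omega) (by omega)

theorem runOf_Q {cs : List Char} {g : Int} {j : Nat} (h : pvDig cs j = true)
    (hj : (j : Int) = g - 1 ∨ (j : Int) = g ∨ (j : Int) = g + 1) :
    g ≥ ((pvRunOf cs j).1 : Int) - 1 ∧
      g ≤ (((pvRunOf cs j).1 : Int) + (pvRunOf cs j).2.length - 1) + 1 := by
  obtain ⟨-, h1, h2, -⟩ := runOf_spec h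
  omega

theorem runOf_succ {cs : List Char} {j : Nat} (h : pvDig cs j = true)
    (h' : pvDig cs (j + 1) = true) : pvRunOf cs (j + 1) = pvRunOf cs j := by
  have hstart : pvRunStart cs (j + 1) = pvRunStart cs j := by
    rw [pvRunStart, if_pos (by rw [← pvDig_getD (pvDig_lt h)]; exact h)]
  rw [pvRunOf, hstart]; rfl

/- KEY 1: the adjacency filter over all runs equals B's 3-cell window scan -/
theorem key_adj (cs : List Char) (g : Int) :
    ((pvRuns cs 0).filter (fun p =>
        decide (g ≥ (p.1 : Int) - 1 ∧ g ≤ ((p.1 : Int) + p.2.length - 1) + 1))).map pvVal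
      = pvWindow cs g := by
  by_cases h0 : pvDigitAt cs g = true
  · -- the gear cell itself is a digit: everything in the window belongs to one run
    obtain ⟨hg0, hgt, hgd⟩ := pvDigitAt_iff.mp h0
    obtain ⟨hRmem, hR1, hR2, hRnum⟩ := runOf_spec hgd
    obtain ⟨hLR, hallR, hendR, hbR, -⟩ := run_facts hRmem
    have hfilter : (pvRuns cs 0).filter (fun p =>
        decide (g ≥ (p.1 : Int) - 1 ∧ g ≤ ((p.1 : Int) + p.2.length - 1) + 1))
        = [pvRunOf cs g.toNat] := by
      apply filter_eq_of_sublist (List.singleton_sublist.mpr hRmem) (pvRuns_nodup cs 0)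
      intro x hx
      simp only [decide_eq_true_eq, List.mem_singleton]
      constructor
      · intro hq
        obtain ⟨j, hj3, hjd, hxe⟩ := Q_run hx hq
        subst hxe
        rcases hj3 with hj | hj | hj
        · rw [show g.toNat = j + 1 by omega]
          exact (runOf_succ hjd (by rw [show j + 1 = g.toNat by omega]; exact hgd)).symm
        · rw [show j = g.toNat by omega]
        · rw [show j = g.toNat + 1 by omega]
          exact runOf_succ hgd (by rw [show g.toNat + 1 = j by omega]; exact hjd)
      · intro hxe
        rw [hxe]
        exact runOf_Q hgd (Or.inr (Or.inl (by omega)))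
    rw [hfilter]
    by_cases hm : pvDigitAt cs (g - 1) = true
    · obtain ⟨hm0, hmt, hmd⟩ := pvDigitAt_iff.mp hm
      have hlow : (pvRunOf cs g.toNat).1 ≤ (g - 1).toNat := by
        rcases hbR with hz | hbd
        · omega
        · by_contra hc
          rw [show (pvRunOf cs g.toNat).1 - 1 = (g - 1).toNat by omega] at hbd
          rw [hmd] at hbd; exact absurd hbd (by simp)
      have hnumm : pvNumAt cs (g - 1).toNat
          = ((pvRunOf cs g.toNat).1, pvVal (pvRunOf cs g.toNat)) :=
        numAt_eq hRmem hlow (by omega)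
      have hnumm' : pvNumAt cs (g.toNat - 1)
          = ((pvRunOf cs g.toNat).1, pvVal (pvRunOf cs g.toNat)) := by
        rw [show g.toNat - 1 = (g - 1).toNat by omega]; exact hnumm
      by_cases hp : pvDigitAt cs (g + 1) = true
      · obtain ⟨hp0, hpt, hpd⟩ := pvDigitAt_iff.mp hp
        have hup : (g + 1).toNat < (pvRunOf cs g.toNat).1 + (pvRunOf cs g.toNat).2.length := by
          by_contra hc
          rw [show (pvRunOf cs g.toNat).1 + (pvRunOf cs g.toNat).2.length = (g + 1).toNat
            by omega] at hendR
          rw [hendR] at hpd; exact absurd hpd (by simp)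
        have hnump : pvNumAt cs (g + 1).toNat
            = ((pvRunOf cs g.toNat).1, pvVal (pvRunOf cs g.toNat)) :=
          numAt_eq hRmem (by omega) hup
        have hnump' : pvNumAt cs (g.toNat + 1)
            = ((pvRunOf cs g.toNat).1, pvVal (pvRunOf cs g.toNat)) := by
          rw [show g.toNat + 1 = (g + 1).toNat by omega]; exact hnump
        simp [pvWindow, pvWinStep, hm, h0, hp, hnumm, hnumm', hRnum, hnump, hnump']
      · have hp' : pvDigitAt cs (g + 1) = false := by simpa using hp
        simp [pvWindow, pvWinStep, hm, h0, hp', hnumm, hnumm', hRnum]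
    · have hm' : pvDigitAt cs (g - 1) = false := by simpa using hm
      by_cases hp : pvDigitAt cs (g + 1) = true
      · obtain ⟨hp0, hpt, hpd⟩ := pvDigitAt_iff.mp hp
        have hup : (g + 1).toNat < (pvRunOf cs g.toNat).1 + (pvRunOf cs g.toNat).2.length := by
          by_contra hc
          rw [show (pvRunOf cs g.toNat).1 + (pvRunOf cs g.toNat).2.length = (g + 1).toNat
            by omega] at hendR
          rw [hendR] at hpd; exact absurd hpd (by simp)
        have hnump : pvNumAt cs (g + 1).toNat
            = ((pvRunOf cs g.toNat).1, pvVal (pvRunOf cs g.toNat)) :=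
          numAt_eq hRmem (by omega) hup
        have hnump' : pvNumAt cs (g.toNat + 1)
            = ((pvRunOf cs g.toNat).1, pvVal (pvRunOf cs g.toNat)) := by
          rw [show g.toNat + 1 = (g + 1).toNat by omega]; exact hnump
        simp [pvWindow, pvWinStep, hm', h0, hp, hRnum, hnump, hnump']
      · have hp' : pvDigitAt cs (g + 1) = false := by simpa using hp
        simp [pvWindow, pvWinStep, hm', h0, hp', hRnum]
  · -- the gear cell is not a digit
    have h0' : pvDigitAt cs g = false := by simpa using h0
    by_cases hm : pvDigitAt cs (g - 1) = true
    · obtain ⟨hm0, hmt, hmd⟩ := pvDigitAt_iff.mp hm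
      obtain ⟨hRm, hR1, hR2, hRn⟩ := runOf_spec hmd
      have hgd0 : pvDig cs g.toNat = false := pvDigitAt_false h0' (by omega)
      by_cases hp : pvDigitAt cs (g + 1) = true
      · -- two distinct runs, left and right of the gear
        obtain ⟨hp0, hpt, hpd⟩ := pvDigitAt_iff.mp hp
        obtain ⟨hPm, hP1, hP2, hPn⟩ := runOf_spec hpd
        have hPstart : pvRunStart cs (g + 1).toNat = (g + 1).toNat := by
          apply runStart_eq ?_ ?_ le_rfl
          · intro k hk1 hk2
            rw [show k = (g + 1).toNat by omega]; exact hpd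
          · exact Or.inr (by rw [show (g + 1).toNat - 1 = g.toNat by omega]; exact hgd0)
        have hRup : (pvRunOf cs (g - 1).toNat).1 + (pvRunOf cs (g - 1).toNat).2.length
            ≤ g.toNat := by
          by_contra hc
          have := run_dig_mem hRm (j := g.toNat) (by omega) (by omega)
          rw [hgd0] at this; exact absurd this (by simp)
        have hne : (pvRunOf cs (g - 1).toNat).1 < (pvRunOf cs (g + 1).toNat).1 := by
          have : (pvRunOf cs (g + 1).toNat).1 = (g + 1).toNat := hPstart
          omega
        have hfilter : (pvRuns cs 0).filter (fun p =>
            decide (g ≥ (p.1 : Int) - 1 ∧ g ≤ ((p.1 : Int) + p.2.length - 1) + 1))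
            = [pvRunOf cs (g - 1).toNat, pvRunOf cs (g + 1).toNat] := by
          apply filter_eq_of_sublist
            (pair_sublist (pvRuns_pairwise cs 0) hRm hPm hne) (pvRuns_nodup cs 0)
          intro x hx
          simp only [decide_eq_true_eq, List.mem_cons, List.mem_singleton,
            List.not_mem_nil, or_false]
          constructor
          · intro hq
            obtain ⟨j, hj3, hjd, hxe⟩ := Q_run hx hq
            subst hxe
            rcases hj3 with hj | hj | hj
            · exact Or.inl (by rw [show j = (g - 1).toNat by omega])
            · exfalso
              rw [show j = g.toNat by omega, hgd0] at hjd
              exact absurd hjd (by simp)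
            · exact Or.inr (by rw [show j = (g + 1).toNat by omega])
          · rintro (hxe | hxe) <;> rw [hxe]
            · exact runOf_Q hmd (Or.inl (by omega))
            · exact runOf_Q hpd (Or.inr (Or.inr (by omega)))
        rw [hfilter]
        have hnedup : (pvRunOf cs (g - 1).toNat).1 ≠ (pvRunOf cs (g + 1).toNat).1 := by omega
        have hRn' : pvNumAt cs (g.toNat - 1)
            = ((pvRunOf cs (g - 1).toNat).1, pvVal (pvRunOf cs (g - 1).toNat)) := by
          rw [show g.toNat - 1 = (g - 1).toNat by omega]; exact hRn
        have hPn' : pvNumAt cs (g.toNat + 1)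
            = ((pvRunOf cs (g + 1).toNat).1, pvVal (pvRunOf cs (g + 1).toNat)) := by
          rw [show g.toNat + 1 = (g + 1).toNat by omega]; exact hPn
        have hnedup' : (pvRunOf cs (g.toNat - 1)).1 ≠ (pvRunOf cs (g + 1).toNat).1 := by
          rw [show g.toNat - 1 = (g - 1).toNat by omega]; exact hnedup
        simp [pvWindow, pvWinStep, hm, h0', hp, hRn, hRn', hPn, hPn', hnedup, hnedup']
      · have hp' : pvDigitAt cs (g + 1) = false := by simpa using hp
        have hfilter : (pvRuns cs 0).filter (fun p =>
            decide (g ≥ (p.1 : Int) - 1 ∧ g ≤ ((p.1 : Int) + p.2.length - 1) + 1))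
            = [pvRunOf cs (g - 1).toNat] := by
          apply filter_eq_of_sublist (List.singleton_sublist.mpr hRm) (pvRuns_nodup cs 0)
          intro x hx
          simp only [decide_eq_true_eq, List.mem_singleton]
          constructor
          · intro hq
            obtain ⟨j, hj3, hjd, hxe⟩ := Q_run hx hq
            subst hxe
            rcases hj3 with hj | hj | hj
            · rw [show j = (g - 1).toNat by omega]
            · exfalso
              rw [pvDigitAt_false h0' hj] at hjd; exact absurd hjd (by simp)
            · exfalso
              rw [pvDigitAt_false hp' hj] at hjd; exact absurd hjd (by simp)
          · intro hxe
            rw [hxe]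
            exact runOf_Q hmd (Or.inl (by omega))
        rw [hfilter]
        have hRn' : pvNumAt cs (g.toNat - 1)
            = ((pvRunOf cs (g - 1).toNat).1, pvVal (pvRunOf cs (g - 1).toNat)) := by
          rw [show g.toNat - 1 = (g - 1).toNat by omega]; exact hRn
        simp [pvWindow, pvWinStep, hm, h0', hp', hRn, hRn']
    · have hm' : pvDigitAt cs (g - 1) = false := by simpa using hm
      by_cases hp : pvDigitAt cs (g + 1) = true
      · obtain ⟨hp0, hpt, hpd⟩ := pvDigitAt_iff.mp hp
        obtain ⟨hPm, hP1, hP2, hPn⟩ := runOf_spec hpd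
        have hfilter : (pvRuns cs 0).filter (fun p =>
            decide (g ≥ (p.1 : Int) - 1 ∧ g ≤ ((p.1 : Int) + p.2.length - 1) + 1))
            = [pvRunOf cs (g + 1).toNat] := by
          apply filter_eq_of_sublist (List.singleton_sublist.mpr hPm) (pvRuns_nodup cs 0)
          intro x hx
          simp only [decide_eq_true_eq, List.mem_singleton]
          constructor
          · intro hq
            obtain ⟨j, hj3, hjd, hxe⟩ := Q_run hx hq
            subst hxe
            rcases hj3 with hj | hj | hj
            · exfalso
              rw [pvDigitAt_false hm' hj] at hjd; exact absurd hjd (by simp)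
            · exfalso
              rw [pvDigitAt_false h0' hj] at hjd; exact absurd hjd (by simp)
            · rw [show j = (g + 1).toNat by omega]
          · intro hxe
            rw [hxe]
            exact runOf_Q hpd (Or.inr (Or.inr (by omega)))
        rw [hfilter]
        simp [pvWindow, pvWinStep, hm', h0', hp, hPn]
      · have hp' : pvDigitAt cs (g + 1) = false := by simpa using hp
        have hfilter : (pvRuns cs 0).filter (fun p =>
            decide (g ≥ (p.1 : Int) - 1 ∧ g ≤ ((p.1 : Int) + p.2.length - 1) + 1))
            = [] := by
          apply filter_eq_of_sublist (List.nil_sublist _) (pvRuns_nodup cs 0)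
          intro x hx
          simp only [decide_eq_true_eq, List.not_mem_nil, iff_false]
          intro hq
          obtain ⟨j, hj3, hjd, hxe⟩ := Q_run hx hq
          rcases hj3 with hj | hj | hj
          · rw [pvDigitAt_false hm' hj] at hjd; exact absurd hjd (by simp)
          · rw [pvDigitAt_false h0' hj] at hjd; exact absurd hjd (by simp)
          · rw [pvDigitAt_false hp' hj] at hjd; exact absurd hjd (by simp)
        rw [hfilter]
        simp [pvWindow, pvWinStep, hm', h0', hp']

/- KEY 2: the endpoints filter over all runs equals B's two same-row neighbour checks -/
theorem key_row (cs : List Char) (g : Int) :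
    ((pvRuns cs 0).filter (fun p =>
        decide (g = (p.1 : Int) - 1 ∨ g = ((p.1 : Int) + p.2.length - 1) + 1))).map pvVal
      = (if pvDigitAt cs (g - 1) && !pvDigitAt cs g then [(pvNumAt cs (g - 1).toNat).2] else [])
        ++ (if pvDigitAt cs (g + 1) && !pvDigitAt cs g then [(pvNumAt cs (g + 1).toNat).2] else []) := by
  by_cases h0 : pvDigitAt cs g = true
  · obtain ⟨hg0, hgt, hgd⟩ := pvDigitAt_iff.mp h0
    have hfilter : (pvRuns cs 0).filter (fun p =>
        decide (g = (p.1 : Int) - 1 ∨ g = ((p.1 : Int) + p.2.length - 1) + 1)) = [] := by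
      apply filter_eq_of_sublist (List.nil_sublist _) (pvRuns_nodup cs 0)
      intro x hx
      simp only [decide_eq_true_eq, List.not_mem_nil, iff_false]
      obtain ⟨hL, hall, hend, hb, -⟩ := run_facts hx
      rintro (hq | hq)
      · rcases hb with hz | hbd
        · omega
        · rw [show x.1 - 1 = g.toNat by omega] at hbd
          rw [hgd] at hbd; exact absurd hbd (by simp)
      · rw [show x.1 + x.2.length = g.toNat by omega] at hend
        rw [hgd] at hend; exact absurd hend (by simp)
    rw [hfilter]
    simp [h0]
  · have h0' : pvDigitAt cs g = false := by simpa using h0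
    by_cases hm : pvDigitAt cs (g - 1) = true
    · obtain ⟨hm0, hmt, hmd⟩ := pvDigitAt_iff.mp hm
      obtain ⟨hRm, hR1, hR2, hRn⟩ := runOf_spec hmd
      have hgd0 : pvDig cs g.toNat = false := pvDigitAt_false h0' (by omega)
      have hRup : (pvRunOf cs (g - 1).toNat).1 + (pvRunOf cs (g - 1).toNat).2.length
          = g.toNat := by
        rcases Nat.lt_or_ge g.toNat
            ((pvRunOf cs (g - 1).toNat).1 + (pvRunOf cs (g - 1).toNat).2.length) with hc | hc
        · exfalso
          have := run_dig_mem hRm (j := g.toNat) (by omega) (by omega)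
          rw [hgd0] at this; exact absurd this (by simp)
        · omega
      have hQR : g = ((pvRunOf cs (g - 1).toNat).1 : Int)
          + (pvRunOf cs (g - 1).toNat).2.length - 1 + 1 := by omega
      by_cases hp : pvDigitAt cs (g + 1) = true
      · obtain ⟨hp0, hpt, hpd⟩ := pvDigitAt_iff.mp hp
        obtain ⟨hPm, hP1, hP2, hPn⟩ := runOf_spec hpd
        have hPstart : pvRunStart cs (g + 1).toNat = (g + 1).toNat := by
          apply runStart_eq ?_ ?_ le_rfl
          · intro k hk1 hk2
            rw [show k = (g + 1).toNat by omega]; exact hpd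
          · exact Or.inr (by rw [show (g + 1).toNat - 1 = g.toNat by omega]; exact hgd0)
        have hne : (pvRunOf cs (g - 1).toNat).1 < (pvRunOf cs (g + 1).toNat).1 := by
          have : (pvRunOf cs (g + 1).toNat).1 = (g + 1).toNat := hPstart
          omega
        have hfilter : (pvRuns cs 0).filter (fun p =>
            decide (g = (p.1 : Int) - 1 ∨ g = ((p.1 : Int) + p.2.length - 1) + 1))
            = [pvRunOf cs (g - 1).toNat, pvRunOf cs (g + 1).toNat] := by
          apply filter_eq_of_sublist
            (pair_sublist (pvRuns_pairwise cs 0) hRm hPm hne) (pvRuns_nodup cs 0)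
          intro x hx
          simp only [decide_eq_true_eq, List.mem_cons, List.mem_singleton,
            List.not_mem_nil, or_false]
          obtain ⟨hL, hall, hend, hb, -⟩ := run_facts hx
          constructor
          · rintro (hq | hq)
            · exact Or.inr (run_eq_runOf hx (by omega) (by omega))
            · exact Or.inl (run_eq_runOf hx (j := (g - 1).toNat) (by omega) (by omega))
          · rintro (hxe | hxe) <;> rw [hxe]
            · exact Or.inr hQR
            · refine Or.inl ?_
              have : (pvRunOf cs (g + 1).toNat).1 = (g + 1).toNat := hPstart
              omega
        rw [hfilter]
        have hRn' : pvNumAt cs (g.toNat - 1)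
            = ((pvRunOf cs (g - 1).toNat).1, pvVal (pvRunOf cs (g - 1).toNat)) := by
          rw [show g.toNat - 1 = (g - 1).toNat by omega]; exact hRn
        simp [hm, hp, h0', hRn, hRn', hPn,
          show pvRunOf cs (g.toNat - 1) = pvRunOf cs (g - 1).toNat from by
            rw [show g.toNat - 1 = (g - 1).toNat by omega]]
      · have hp' : pvDigitAt cs (g + 1) = false := by simpa using hp
        have hfilter : (pvRuns cs 0).filter (fun p =>
            decide (g = (p.1 : Int) - 1 ∨ g = ((p.1 : Int) + p.2.length - 1) + 1))
            = [pvRunOf cs (g - 1).toNat] := by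
          apply filter_eq_of_sublist (List.singleton_sublist.mpr hRm) (pvRuns_nodup cs 0)
          intro x hx
          simp only [decide_eq_true_eq, List.mem_singleton]
          obtain ⟨hL, hall, hend, hb, -⟩ := run_facts hx
          constructor
          · rintro (hq | hq)
            · exfalso
              have hdx := run_dig_mem hx le_rfl (by omega)
              have := pvDigitAt_false hp' (jn := x.1) (by omega)
              rw [this] at hdx; exact absurd hdx (by simp)
            · exact run_eq_runOf hx (j := (g - 1).toNat) (by omega) (by omega)
          · intro hxe
            rw [hxe]
            exact Or.inr hQR
        rw [hfilter]
        have hRn' : pvNumAt cs (g.toNat - 1)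
            = ((pvRunOf cs (g - 1).toNat).1, pvVal (pvRunOf cs (g - 1).toNat)) := by
          rw [show g.toNat - 1 = (g - 1).toNat by omega]; exact hRn
        simp [hm, hp', h0', hRn, hRn',
          show pvRunOf cs (g.toNat - 1) = pvRunOf cs (g - 1).toNat from by
            rw [show g.toNat - 1 = (g - 1).toNat by omega]]
    · have hm' : pvDigitAt cs (g - 1) = false := by simpa using hm
      by_cases hp : pvDigitAt cs (g + 1) = true
      · obtain ⟨hp0, hpt, hpd⟩ := pvDigitAt_iff.mp hp
        obtain ⟨hPm, hP1, hP2, hPn⟩ := runOf_spec hpd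
        have hPstart : pvRunStart cs (g + 1).toNat = (g + 1).toNat := by
          rcases Nat.eq_zero_or_pos (g + 1).toNat with hz | hpos
          · rw [hz]; rfl
          · apply runStart_eq ?_ ?_ le_rfl
            · intro k hk1 hk2
              rw [show k = (g + 1).toNat by omega]; exact hpd
            · refine Or.inr ?_
              rw [show (g + 1).toNat - 1 = g.toNat by omega]
              exact pvDigitAt_false h0' (by omega)
        have hfilter : (pvRuns cs 0).filter (fun p =>
            decide (g = (p.1 : Int) - 1 ∨ g = ((p.1 : Int) + p.2.length - 1) + 1))
            = [pvRunOf cs (g + 1).toNat] := by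
          apply filter_eq_of_sublist (List.singleton_sublist.mpr hPm) (pvRuns_nodup cs 0)
          intro x hx
          simp only [decide_eq_true_eq, List.mem_singleton]
          obtain ⟨hL, hall, hend, hb, -⟩ := run_facts hx
          constructor
          · rintro (hq | hq)
            · exact run_eq_runOf hx (j := (g + 1).toNat) (by omega) (by omega)
            · exfalso
              have hdx := run_dig_mem hx (j := x.1 + x.2.length - 1) (by omega) (by omega)
              have := pvDigitAt_false hm' (jn := x.1 + x.2.length - 1) (by omega)
              rw [this] at hdx; exact absurd hdx (by simp)
          · intro hxe
            rw [hxe]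
            refine Or.inl ?_
            have : (pvRunOf cs (g + 1).toNat).1 = (g + 1).toNat := hPstart
            omega
        rw [hfilter]
        simp [hm', hp, h0', hPn]
      · have hp' : pvDigitAt cs (g + 1) = false := by simpa using hp
        have hfilter : (pvRuns cs 0).filter (fun p =>
            decide (g = (p.1 : Int) - 1 ∨ g = ((p.1 : Int) + p.2.length - 1) + 1))
            = [] := by
          apply filter_eq_of_sublist (List.nil_sublist _) (pvRuns_nodup cs 0)
          intro x hx
          simp only [decide_eq_true_eq, List.not_mem_nil, iff_false]
          obtain ⟨hL, hall, hend, hb, -⟩ := run_facts hx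
          rintro (hq | hq)
          · have hdx := run_dig_mem hx le_rfl (by omega)
            have := pvDigitAt_false hp' (jn := x.1) (by omega)
            rw [this] at hdx; exact absurd hdx (by simp)
          · have hdx := run_dig_mem hx (j := x.1 + x.2.length - 1) (by omega) (by omega)
            have := pvDigitAt_false hm' (jn := x.1 + x.2.length - 1) (by omega)
            rw [this] at hdx; exact absurd hdx (by simp)
        rw [hfilter]
        simp [hm', hp', h0']

/- port A's scanner: clean state (working number empty) and mid-run state invariants -/
theorem findAux_eq (n : Nat) : ∀ cs : List Char, cs.length ≤ n →
    (∀ (i : Nat) (acc : List (Int × Int × Int)),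
        pvFindAux cs (i : Int) [] none acc = acc ++ (pvRuns cs i).map pvMkT) ∧
    (∀ (s : Nat) (wn : List Char) (acc : List (Int × Int × Int)), wn ≠ [] →
        pvFindAux cs ((s : Int) + wn.length) wn (some (s : Int)) acc
          = acc ++ pvMkT (s, wn ++ cs.takeWhile pvIsNum)
              :: (pvRuns (cs.dropWhile pvIsNum)
                    (s + (wn ++ cs.takeWhile pvIsNum).length)).map pvMkT) := by
  induction n with
  | zero =>
    intro cs hlen
    have hcs : cs = [] := by cases cs <;> simp_all
    subst hcs
    constructor
    · intro i acc
      simp [pvFindAux, pvRuns]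
    · intro s wn acc hne
      simp [pvFindAux, pvRuns, pvMkT, pvVal, hne]
  | succ n ihn =>
    intro cs hlen
    cases cs with
    | nil =>
      constructor
      · intro i acc
        simp [pvFindAux, pvRuns]
      · intro s wn acc hne
        simp [pvFindAux, pvRuns, pvMkT, pvVal, hne]
    | cons c rest =>
      obtain ⟨ihF, ihM⟩ := ihn rest (by simp at hlen; omega)
      constructor
      · intro i acc
        rw [pvFindAux]
        by_cases h : pvIsNum c
        · rw [if_pos h]
          have hm := ihM i [c] acc (by simp)
          simp only [List.length_cons, List.length_nil, Nat.cast_add, Nat.cast_one,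
            Nat.cast_zero, zero_add] at hm
          simp only [List.nil_append, if_true]
          rw [hm]
          simp [pvRuns, h, List.takeWhile_cons, List.dropWhile_cons]
        · rw [if_neg h, if_neg (by simp)]
          have hf := ihF (i + 1) acc
          push_cast at hf
          rw [hf]
          simp [pvRuns, h]
      · intro s wn acc hne
        rw [pvFindAux]
        by_cases h : pvIsNum c
        · rw [if_pos h]
          have hm := ihM s (wn ++ [c]) acc (by simp)
          rw [show ((s : Int) + ↑(wn ++ [c]).length) = (s : Int) + ↑wn.length + 1 from by
            push_cast [List.length_append, List.length_cons, List.length_nil]; omega] at hm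
          rw [if_neg (by simp)]
          rw [hm]
          simp only [pvRuns, h, dif_pos, List.takeWhile_cons, List.dropWhile_cons, if_true]
          rw [show wn ++ c :: List.takeWhile pvIsNum rest
              = (wn ++ [c]) ++ List.takeWhile pvIsNum rest from List.append_cons _ _ _]
        · rw [if_neg h, if_pos hne]
          have hf := ihF (s + wn.length + 1) (acc ++
            [((PySem.Int.ofChars? wn).getD 0, (some (s : Int)).getD 0, (s : Int) + ↑wn.length - 1)])
          push_cast at hf
          rw [hf]
          simp [pvRuns, h, List.takeWhile_cons, List.dropWhile_cons, pvMkT, pvVal]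

/- port A's scanner produces exactly the runs, as triples -/
theorem find_eq_runs (row : String) :
    find_numbers_in_row row = (pvRuns row.toList 0).map pvMkT := by
  have h := (findAux_eq row.toList.length row.toList le_rfl).1 0 []
  simpa [find_numbers_in_row] using h

-- ===== VERDICT (by name: the statement is the Claim_ definition above) =====
theorem val_comp_mkT : ((fun t : Int × Int × Int => t.1) ∘ pvMkT) = pvVal :=
  funext (fun _ => rfl)

theorem append_if_if (v : List Int) (c1 c2 : Bool) (x y : Int) :
    (if c2 then (if c1 then v ++ [x] else v) ++ [y] else (if c1 then v ++ [x] else v))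
      = v ++ ((if c1 then [x] else []) ++ (if c2 then [y] else [])) := by
  cases c1 <;> cases c2 <;> simp

theorem look_for_adjacent_numbers_spec : Claim_equal_look_for_adjacent_numbers := by
  unfold Claim_equal_look_for_adjacent_numbers
  intro g row ra rb _hdom
  unfold Spec_look_for_adjacent_numbers
  simp only [look_for_adjacent_numbers, look_for_adjacent_numbers_alt]
  rw [find_eq_runs, find_eq_runs, find_eq_runs]
  rw [PySem.List.foldl_append_if, PySem.List.foldl_append_if, PySem.List.foldl_append_if]
  rw [List.filter_map, List.filter_map, List.filter_map]
  rw [List.map_map, List.map_map, List.map_map]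
  rw [val_comp_mkT]
  rw [show ((fun t : Int × Int × Int => decide (g ≥ t.2.1 - 1 ∧ g ≤ t.2.2 + 1)) ∘ pvMkT)
      = (fun p : Nat × List Char =>
          decide (g ≥ (p.1 : Int) - 1 ∧ g ≤ ((p.1 : Int) + p.2.length - 1) + 1)) from
    funext (fun _ => rfl)]
  rw [show ((fun t : Int × Int × Int => decide (g = t.2.1 - 1 ∨ g = t.2.2 + 1)) ∘ pvMkT)
      = (fun p : Nat × List Char =>
          decide (g = (p.1 : Int) - 1 ∨ g = ((p.1 : Int) + p.2.length - 1) + 1)) from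
    funext (fun _ => rfl)]
  rw [key_adj, key_adj, key_row]
  rw [append_if_if]
  simp [List.append_assoc]
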